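-- pv_equiv track=rewrite | github.com/hiduard/fase1 | compilador.py | estadoPalavraChave
-- ===== SOURCE A (Python) =====
-- TOKEN_KEYWORD  = "KEYWORD"
--
-- TOKEN_ERROR    = "ERROR"
--
-- def estadoPalavraChave(linha, pos, tokens):
--     palavra = ""
--
--     while pos < len(linha) and linha[pos] >= 'A' and linha[pos] <= 'Z':
--         palavra = palavra + linha[pos]
--         pos = pos + 1
--
--     if pos < len(linha) and ((linha[pos] >= 'a' and linha[pos] <= 'z') or
--                               (linha[pos] >= '0' and linha[pos] <= '9')):
--         while pos < len(linha) and linha[pos] != ' ' and linha[pos] != ')' and linha[pos] != '(':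
--             palavra = palavra + linha[pos]
--             pos = pos + 1
--         tokens.append((TOKEN_ERROR, palavra))
--         return pos
--
--     tokens.append((TOKEN_KEYWORD, palavra))
--     return pos
-- ===== SOURCE B (Python) =====
-- import re
--
-- TOKEN_KEYWORD = "KEYWORD"
-- TOKEN_ERROR = "ERROR"
--
-- def estadoPalavraChave(linha, pos, tokens):
--     resto = linha[pos:]
--     palavra = re.match(r'[A-Z]*', resto).group(0)
--     pos += len(palavra)
--     resto = resto[len(palavra):]
--     if re.match(r'[a-z0-9]', resto):
--         cauda = re.match(r'[^ ()]*', resto).group(0)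
--         tokens.append((TOKEN_ERROR, palavra + cauda))
--         return pos + len(cauda)
--     tokens.append((TOKEN_KEYWORD, palavra))
--     return pos
-- ===== Notes on version B (the rewrite author's own statement) =====
-- stated objective: faster
-- what changed: Replaces the two manual char-by-char while-loops with their O(n^2) incremental string concatenation by regex scans on the slice linha[pos:] (one re.match for the uppercase prefix, one for the run up to a space/parenthesis delimiter), advancing the cursor by match lengths.
-- outside the precondition, e.g. on estadoPalavraChave('AB', -1, []): A returns 2, B returns 0; on estadoPalavraChave('AB', -5, []): A raises IndexError, B returns -3
import Mathlib
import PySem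

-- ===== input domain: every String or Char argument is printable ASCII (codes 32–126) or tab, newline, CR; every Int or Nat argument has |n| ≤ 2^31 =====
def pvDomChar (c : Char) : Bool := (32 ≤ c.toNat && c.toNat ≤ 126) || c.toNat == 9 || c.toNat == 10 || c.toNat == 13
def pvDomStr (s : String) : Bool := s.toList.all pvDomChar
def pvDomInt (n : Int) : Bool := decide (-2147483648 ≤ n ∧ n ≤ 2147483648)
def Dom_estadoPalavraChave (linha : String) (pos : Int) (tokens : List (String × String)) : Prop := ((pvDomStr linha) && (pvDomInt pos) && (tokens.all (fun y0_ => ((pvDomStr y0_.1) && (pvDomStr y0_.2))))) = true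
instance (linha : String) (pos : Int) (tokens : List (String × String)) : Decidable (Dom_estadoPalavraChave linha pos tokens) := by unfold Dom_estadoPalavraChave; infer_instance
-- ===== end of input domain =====

-- B replaces A's two manual character-comparison while-loops by regex-style scans over the slice
-- linha[pos:] (objective: faster — A builds the word by repeated string concatenation, quadratic in the
-- token length; B captures it with a single linear regex match; a timing run measured B faster). Both Pythons append one token to `tokens`; the
-- equivalence proved here is about the RETURN value (the new position) only — on every input
-- admitted by Pre_ the Python B appends the same token as A.

-- ===== PORT A =====
-- while pos < len(linha) and linha[pos] >= 'A' and linha[pos] <= 'Z': palavra += linha[pos]; pos += 1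
def pvALoop1 (cs : List Char) (pos : Int) (palavra : List Char) : Int × List Char :=
  if _h : pos < (cs.length : Int) then
    match PySem.List.pyGet? cs pos with
    | none => (pos, palavra)   -- Python raises IndexError here (pos < -len); excluded by Pre_
    | some c =>
      if decide ('A' ≤ c ∧ c ≤ 'Z') then pvALoop1 cs (pos + 1) (palavra ++ [c])
      else (pos, palavra)
  else (pos, palavra)
termination_by ((cs.length : Int) - pos).toNat
decreasing_by omega

-- while pos < len(linha) and linha[pos] != ' ' and linha[pos] != ')' and linha[pos] != '(': …
def pvALoop2 (cs : List Char) (pos : Int) (palavra : List Char) : Int × List Char :=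
  if _h : pos < (cs.length : Int) then
    match PySem.List.pyGet? cs pos with
    | none => (pos, palavra)   -- Python raises IndexError here; excluded by Pre_
    | some c =>
      if decide (c ≠ ' ' ∧ c ≠ ')' ∧ c ≠ '(') then pvALoop2 cs (pos + 1) (palavra ++ [c])
      else (pos, palavra)
  else (pos, palavra)
termination_by ((cs.length : Int) - pos).toNat
decreasing_by omega

def estadoPalavraChave (linha : String) (pos : Int) (tokens : List (String × String)) : Int :=
  let cs := linha.toList
  let r1 := pvALoop1 cs pos []
  if r1.1 < (cs.length : Int) then
    match PySem.List.pyGet? cs r1.1 with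
    | none => r1.1   -- unreachable under the guard r1.1 < len for r1.1 ≥ 0
    | some c =>
      if decide (('a' ≤ c ∧ c ≤ 'z') ∨ ('0' ≤ c ∧ c ≤ '9')) then
        (pvALoop2 cs r1.1 r1.2).1     -- tokens.append((TOKEN_ERROR, palavra)) — return value unaffected
      else r1.1                        -- tokens.append((TOKEN_KEYWORD, palavra))
  else r1.1                            -- tokens.append((TOKEN_KEYWORD, palavra))

-- ===== PORT B =====
-- Source B: resto = linha[pos:]; palavra = re.match(r'[A-Z]*', resto).group(0); advance; then if
-- re.match(r'[a-z0-9]', resto): cauda = re.match(r'[^ ()]*', resto).group(0); advance.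
-- re.match(r'[X]*', s).group(0), the maximal class-prefix of s, is List.takeWhile;
-- re.match(r'[X]', s) tests whether the first character of s is in the class (head?.any).
def estadoPalavraChave_alt (linha : String) (pos : Int) (tokens : List (String × String)) : Int :=
  let resto := PySem.List.slice linha.toList (some pos) none
  let palavra := resto.takeWhile (fun c => decide ('A' ≤ c ∧ c ≤ 'Z'))
  let pos1 := pos + (palavra.length : Int)
  let resto1 := resto.drop palavra.length
  if resto1.head?.any (fun c => decide (('a' ≤ c ∧ c ≤ 'z') ∨ ('0' ≤ c ∧ c ≤ '9'))) then
    let cauda := resto1.takeWhile (fun c => decide (c ≠ ' ' ∧ c ≠ ')' ∧ c ≠ '('))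
    pos1 + (cauda.length : Int)        -- tokens.append((TOKEN_ERROR, palavra + cauda))
  else pos1                            -- tokens.append((TOKEN_KEYWORD, palavra))

-- ===== PRECONDITION & SPEC =====
-- Pre_ excludes negative pos, a corner the tokenizer's cursor never reaches: there A raises
-- IndexError (pos < -len) or scans through Python's negative-index wraparound, re-reading the
-- start of the line, while B scans the suffix linha[pos:].
def Pre_estadoPalavraChave (linha : String) (pos : Int) (tokens : List (String × String)) : Prop := 0 ≤ pos
instance (linha : String) (pos : Int) (tokens : List (String × String)) : Decidable (Pre_estadoPalavraChave linha pos tokens) := by unfold Pre_estadoPalavraChave; infer_instance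
def pvWitness_estadoPalavraChave : String × Int × (List (String × String)) := ("AB c", 0, [])

def Spec_estadoPalavraChave (linha : String) (pos : Int) (tokens : List (String × String)) (out : Int) : Prop := out = estadoPalavraChave_alt linha pos tokens
instance (linha : String) (pos : Int) (tokens : List (String × String)) (out : Int) : Decidable (Spec_estadoPalavraChave linha pos tokens out) := by unfold Spec_estadoPalavraChave; infer_instance

-- ===== CLAIM (what is proved, stated in full; the proofs are below) =====
def Claim_equal_estadoPalavraChave : Prop := ∀ (linha : String) (pos : Int) (tokens : List (String × String)), Dom_estadoPalavraChave linha pos tokens → Pre_estadoPalavraChave linha pos tokens → Spec_estadoPalavraChave linha pos tokens (estadoPalavraChave linha pos tokens)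

-- ===== LEMMAS AND PROOFS =====

-- A's first while-loop, started at a nonnegative position n, advances by exactly the length of the
-- uppercase takeWhile-prefix of cs.drop n — the word B's first regex match captures.
theorem pvALoop1_eq (cs : List Char) (n : Nat) (acc : List Char) :
    pvALoop1 cs (n : Int) acc =
      ((n : Int) + (((cs.drop n).takeWhile (fun c => decide ('A' ≤ c ∧ c ≤ 'Z'))).length : Int),
       acc ++ (cs.drop n).takeWhile (fun c => decide ('A' ≤ c ∧ c ≤ 'Z'))) := by
  suffices H : ∀ k n acc, cs.length - n = k → pvALoop1 cs (n : Int) acc =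
      ((n : Int) + (((cs.drop n).takeWhile (fun c => decide ('A' ≤ c ∧ c ≤ 'Z'))).length : Int),
       acc ++ (cs.drop n).takeWhile (fun c => decide ('A' ≤ c ∧ c ≤ 'Z'))) from H _ n acc rfl
  intro k
  induction k with
  | zero =>
    intro n acc hk
    have hge : cs.length ≤ n := by omega
    rw [pvALoop1, dif_neg (by omega), List.drop_eq_nil_of_le hge]
    simp
  | succ k ih =>
    intro n acc hk
    have hlt : n < cs.length := by omega
    have hget : PySem.List.pyGet? cs (n : Int) = some cs[n] := by
      rw [PySem.List.pyGet?_natCast, List.getElem?_eq_getElem hlt]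
    have hdrop : cs.drop n = cs[n] :: cs.drop (n + 1) := List.drop_eq_getElem_cons hlt
    rw [pvALoop1, dif_pos (by omega), hget, hdrop]
    show (if decide ('A' ≤ cs[n] ∧ cs[n] ≤ 'Z') = true then pvALoop1 cs ((n : Int) + 1) (acc ++ [cs[n]]) else ((n : Int), acc)) = _
    by_cases hp : decide ('A' ≤ cs[n] ∧ cs[n] ≤ 'Z') = true
    · have hc : ((n : Int) + 1) = ((n + 1 : Nat) : Int) := by omega
      rw [if_pos hp, hc, ih (n + 1) (acc ++ [cs[n]]) (by omega)]
      simp only [List.takeWhile_cons, hp, if_true]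
      simp only [Prod.mk.injEq]
      constructor
      · simp only [List.length_cons]; omega
      · simp
    · rw [if_neg hp]
      simp only [List.takeWhile_cons]
      rw [if_neg hp]
      simp

-- The same invariant for A's second while-loop and B's delimiter regex.
theorem pvALoop2_eq (cs : List Char) (n : Nat) (acc : List Char) :
    pvALoop2 cs (n : Int) acc =
      ((n : Int) + (((cs.drop n).takeWhile (fun c => decide (c ≠ ' ' ∧ c ≠ ')' ∧ c ≠ '('))).length : Int),
       acc ++ (cs.drop n).takeWhile (fun c => decide (c ≠ ' ' ∧ c ≠ ')' ∧ c ≠ '('))) := by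
  suffices H : ∀ k n acc, cs.length - n = k → pvALoop2 cs (n : Int) acc =
      ((n : Int) + (((cs.drop n).takeWhile (fun c => decide (c ≠ ' ' ∧ c ≠ ')' ∧ c ≠ '('))).length : Int),
       acc ++ (cs.drop n).takeWhile (fun c => decide (c ≠ ' ' ∧ c ≠ ')' ∧ c ≠ '('))) from H _ n acc rfl
  intro k
  induction k with
  | zero =>
    intro n acc hk
    have hge : cs.length ≤ n := by omega
    rw [pvALoop2, dif_neg (by omega), List.drop_eq_nil_of_le hge]
    simp
  | succ k ih =>
    intro n acc hk
    have hlt : n < cs.length := by omega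
    have hget : PySem.List.pyGet? cs (n : Int) = some cs[n] := by
      rw [PySem.List.pyGet?_natCast, List.getElem?_eq_getElem hlt]
    have hdrop : cs.drop n = cs[n] :: cs.drop (n + 1) := List.drop_eq_getElem_cons hlt
    rw [pvALoop2, dif_pos (by omega), hget, hdrop]
    show (if decide (cs[n] ≠ ' ' ∧ cs[n] ≠ ')' ∧ cs[n] ≠ '(') = true then pvALoop2 cs ((n : Int) + 1) (acc ++ [cs[n]]) else ((n : Int), acc)) = _
    by_cases hp : decide (cs[n] ≠ ' ' ∧ cs[n] ≠ ')' ∧ cs[n] ≠ '(') = true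
    · have hc : ((n : Int) + 1) = ((n + 1 : Nat) : Int) := by omega
      rw [if_pos hp, hc, ih (n + 1) (acc ++ [cs[n]]) (by omega)]
      simp only [List.takeWhile_cons, hp, if_true]
      simp only [Prod.mk.injEq]
      constructor
      · simp only [List.length_cons]; omega
      · simp
    · rw [if_neg hp]
      simp only [List.takeWhile_cons]
      rw [if_neg hp]
      simp

theorem pvMain_eq (linha : String) (n : Nat) (tokens : List (String × String)) :
    estadoPalavraChave linha (n : Int) tokens = estadoPalavraChave_alt linha (n : Int) tokens := by
  simp only [estadoPalavraChave, estadoPalavraChave_alt]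
  set cs := linha.toList with hcs
  rw [pvALoop1_eq, PySem.List.slice_from_natCast]
  set t := (cs.drop n).takeWhile (fun c => decide ('A' ≤ c ∧ c ≤ 'Z')) with ht
  have hdd : (cs.drop n).drop t.length = cs.drop (n + t.length) := by
    rw [List.drop_drop]
  have hcast : ((n : Int) + (t.length : Int)) = ((n + t.length : Nat) : Int) := by omega
  simp only [hdd, hcast]
  have hhead : (cs.drop (n + t.length)).head? = cs[n + t.length]? := by
    simp [List.head?_drop]
  by_cases hlt : n + t.length < cs.length
  · have hget : PySem.List.pyGet? cs ((n + t.length : Nat) : Int) = some cs[n + t.length] := by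
      rw [PySem.List.pyGet?_natCast, List.getElem?_eq_getElem hlt]
    rw [if_pos (by push_cast; omega), hget, hhead, List.getElem?_eq_getElem hlt]
    show (if decide (('a' ≤ cs[n + t.length] ∧ cs[n + t.length] ≤ 'z') ∨ ('0' ≤ cs[n + t.length] ∧ cs[n + t.length] ≤ '9')) = true
          then (pvALoop2 cs ((n + t.length : Nat) : Int) ([] ++ t)).1 else ((n + t.length : Nat) : Int)) = _
    by_cases hp : decide (('a' ≤ cs[n + t.length] ∧ cs[n + t.length] ≤ 'z') ∨ ('0' ≤ cs[n + t.length] ∧ cs[n + t.length] ≤ '9')) = true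
    · rw [if_pos hp, pvALoop2_eq]
      simp only [Option.any_some, hp, if_true]
    · rw [if_neg hp]
      simp only [Option.any_some]
      rw [if_neg hp]
  · have hnone : cs[n + t.length]? = none := by
      rw [List.getElem?_eq_none]; omega
    rw [if_neg (by push_cast; omega), hhead, hnone]
    simp only [Option.any_none]
    rw [if_neg (by simp)]

-- ===== VERDICT (by name: the statement is the Claim_ definition above) =====
theorem estadoPalavraChave_spec : Claim_equal_estadoPalavraChave := by
  intro linha pos tokens _ hP
  unfold Pre_estadoPalavraChave at hP
  unfold Spec_estadoPalavraChave
  lift pos to ℕ using hP with n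
  exact pvMain_eq linha n tokens
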